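-- pv_equiv track=rewrite | github.com/alexfuoc/DS_ALG | IntroInterview/CommonItems.py | common_items1
-- ===== SOURCE A (Python) =====
-- def common_items1(array1, array2):
--     """
--     Finding if any items in each array have similar inputs
--     :param array1:
--     :param array2:
--     :return: True or False
--     """
--
--     # Create Dictionary of array1 -
--     # Time Complexity O(n)
--     # Space Complexity O(n)
--     dict1 = {}
--     for item in array1:
--         if item in dict1:
--             updated_value = dict1[item]
--             updated_value += 1
--             dict1[item] = updated_value
--         else:
--             dict1[item] = 1
--
--     # Compare every element of n to dict
--     # Time Complexity O(m)
--     for item in array2: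
--         if item in dict1:
--             return True
--
--     # Overall Time Complexity  O(n + m)
--     return False
-- ===== SOURCE B (Python) =====
-- def common_items1(array1, array2):
--     """
--     Finding if any items in each array have similar inputs
--     :param array1:
--     :param array2:
--     :return: True or False
--     """
--     a = sorted(array1)
--     b = sorted(array2)
--     i = j = 0
--     while i < len(a) and j < len(b):
--         if a[i] == b[j]:
--             return True
--         if a[i] < b[j]:
--             i += 1
--         else:
--             j += 1
--     return False
-- ===== Notes on version B (the rewrite author's own statement) =====
-- stated objective: alternative
-- what changed: Replaces the count-dictionary build plus membership scan with sort-both-arrays and a two-pointer merge walk that stops at the first equal pair.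
import Mathlib
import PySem

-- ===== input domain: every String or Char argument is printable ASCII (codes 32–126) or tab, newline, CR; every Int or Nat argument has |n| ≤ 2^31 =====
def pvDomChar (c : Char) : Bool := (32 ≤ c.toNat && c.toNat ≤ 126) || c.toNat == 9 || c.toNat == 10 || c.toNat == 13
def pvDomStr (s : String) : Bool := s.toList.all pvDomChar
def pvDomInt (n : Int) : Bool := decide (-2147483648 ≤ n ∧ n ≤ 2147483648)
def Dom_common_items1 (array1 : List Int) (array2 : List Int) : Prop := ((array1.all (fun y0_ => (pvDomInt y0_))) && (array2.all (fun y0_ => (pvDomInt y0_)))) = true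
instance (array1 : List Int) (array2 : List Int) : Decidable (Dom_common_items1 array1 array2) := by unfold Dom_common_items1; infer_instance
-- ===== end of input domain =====

-- B replaces A's count-dictionary build + membership scan with sort-both and a two-pointer merge walk (alternative algorithm, not faster).

-- ===== PORT A =====
-- dict-building loop: counts occurrences of each item of array1
def common_items1_dict1 (array1 : List Int) : PySem.Dict Int Int :=
  array1.foldl
    (fun dict1 item =>
      if dict1.contains item then
        dict1.insert item (dict1.getD item 0 + 1)
      else
        dict1.insert item 1)
    PySem.Dict.empty

def common_items1 (array1 : List Int) (array2 : List Int) : Bool :=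
  let dict1 := common_items1_dict1 array1
  -- 'for item in array2: if item in dict1: return True' then 'return False'
  array2.any (fun item => dict1.contains item)

-- ===== PORT B =====
-- the two-pointer while loop: advancing i past consumed prefix of a ≍ recursing on the tails
def common_items1_merge : List Int → List Int → Bool
  | x :: xs, y :: ys =>
      if x == y then true
      else if x < y then common_items1_merge xs (y :: ys)
      else common_items1_merge (x :: xs) ys
  | _, _ => false
termination_by xs ys => xs.length + ys.length

def common_items1_alt (array1 : List Int) (array2 : List Int) : Bool :=
  common_items1_merge (PySem.List.sorted array1 (fun x => x) false)
                      (PySem.List.sorted array2 (fun x => x) false)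

-- ===== PRECONDITION & SPEC =====
def Spec_common_items1 (array1 : List Int) (array2 : List Int) (out : Bool) : Prop := out = common_items1_alt array1 array2
instance (array1 : List Int) (array2 : List Int) (out : Bool) : Decidable (Spec_common_items1 array1 array2 out) := by unfold Spec_common_items1; infer_instance

-- ===== CLAIM =====
def Claim_equal_common_items1 : Prop := ∀ (array1 : List Int) (array2 : List Int), Dom_common_items1 array1 array2 → Spec_common_items1 array1 array2 (common_items1 array1 array2)

-- ===== LEMMAS AND PROOFS =====

-- A's dict contains exactly the elements of array1
theorem common_items1_dict1_contains (array1 : List Int) (x : Int) :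
    (common_items1_dict1 array1).contains x = array1.contains x := by
  unfold common_items1_dict1
  suffices h : ∀ (d : PySem.Dict Int Int),
      (array1.foldl
        (fun dict1 item =>
          if dict1.contains item then
            dict1.insert item (dict1.getD item 0 + 1)
          else
            dict1.insert item 1) d).contains x = (d.contains x || array1.contains x) by
    simpa using h PySem.Dict.empty
  induction array1 with
  | nil => intro d; simp
  | cons a l ih =>
    intro d
    simp only [List.foldl_cons, List.contains_cons]
    by_cases hc : d.contains a <;>
      simp [hc, ih, PySem.Dict.contains_insert, Bool.or_comm, Bool.or_left_comm, Bool.or_assoc]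

-- on (ascending-)sorted lists, the merge walk decides whether the lists share an element
theorem common_items1_merge_spec : ∀ xs ys : List Int, xs.Pairwise (· ≤ ·) → ys.Pairwise (· ≤ ·) →
    common_items1_merge xs ys = decide (∃ z, z ∈ xs ∧ z ∈ ys) := by
  intro xs ys
  induction xs, ys using common_items1_merge.induct with
  | case1 x xs y ys heq =>
    intro _ _
    have hxy : x = y := by simpa using heq
    rw [common_items1_merge]
    simp only [heq, if_true]
    symm
    simp only [decide_eq_true_eq]
    exact ⟨x, by simp, by simp [hxy]⟩
  | case2 x xs y ys heq hlt ih =>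
    intro hx hy
    rw [common_items1_merge]
    simp only [heq, hlt, if_true]
    rw [ih hx.tail hy]
    simp only [Bool.false_eq_true, if_false]
    rw [decide_eq_decide]
    constructor
    · rintro ⟨z, hz1, hz2⟩; exact ⟨z, List.mem_cons_of_mem _ hz1, hz2⟩
    · rintro ⟨z, hz1, hz2⟩
      rcases List.mem_cons.mp hz1 with rfl | hz1
      · -- z = x is in y::ys : contradiction with x < y ≤ every element of y::ys
        exfalso
        rcases List.mem_cons.mp hz2 with rfl | hz2
        · simp at heq
        · have := (List.pairwise_cons.mp hy).1 z hz2
          omega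
      · exact ⟨z, hz1, hz2⟩
  | case3 x xs y ys heq hlt ih =>
    intro hx hy
    rw [common_items1_merge]
    simp only [heq, if_false, hlt, if_false]
    rw [ih hx hy.tail]
    simp only [Bool.false_eq_true, if_false]
    rw [decide_eq_decide]
    constructor
    · rintro ⟨z, hz1, hz2⟩; exact ⟨z, hz1, List.mem_cons_of_mem _ hz2⟩
    · rintro ⟨z, hz1, hz2⟩
      rcases List.mem_cons.mp hz2 with rfl | hz2
      · exfalso
        have hne : x ≠ z := by simpa using heq
        have hyx : z < x := by omega
        rcases List.mem_cons.mp hz1 with rfl | hz1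
        · exact absurd rfl hne
        · have := (List.pairwise_cons.mp hx).1 z hz1
          omega
      · exact ⟨z, hz1, hz2⟩
  | case4 xs ys h =>
    intro _ _
    rcases xs with _ | ⟨x, xs⟩ <;> rcases ys with _ | ⟨y, ys⟩
    · simp [common_items1_merge]
    · simp [common_items1_merge]
    · simp [common_items1_merge]
    · exact (h x xs y ys rfl rfl).elim

theorem common_items1_eq (array1 array2 : List Int) :
    common_items1 array1 array2 = common_items1_alt array1 array2 := by
  unfold common_items1 common_items1_alt
  rw [common_items1_merge_spec _ _ (PySem.List.sorted_pairwise array1 (fun x => x))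
        (PySem.List.sorted_pairwise array2 (fun x => x))]
  simp only [PySem.List.mem_sorted]
  rcases h : array2.any (fun item => (common_items1_dict1 array1).contains item) with _ | _
  · rw [List.any_eq_false] at h
    symm
    simp only [decide_eq_false_iff_not]
    rintro ⟨z, hz1, hz2⟩
    have := h z hz2
    simp [common_items1_dict1_contains] at this
    exact this hz1
  · rw [List.any_eq_true] at h
    obtain ⟨z, hz, hc⟩ := h
    symm
    simp only [decide_eq_true_eq]
    refine ⟨z, ?_, hz⟩
    simpa [common_items1_dict1_contains] using hc

-- ===== VERDICT =====
theorem common_items1_spec : Claim_equal_common_items1 := by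
  intro array1 array2 _
  exact common_items1_eq array1 array2
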